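-- pv_equiv track=rewrite | github.com/KChen-lab/MEDALT | SP1_SCT_UTIL.py | prune____graph
-- ===== SOURCE A (Python) =====
-- def prune____graph(g, cycle):
--     loop_nodes = max(g.keys()) + "1"
--     contracted_graph = {}
--     contracted_graph[loop_nodes] = {}
--     for node in g:
--         if not node in cycle:
--             contracted_graph[node] = {}
--     for node in g:
--         for nbr in g[node]:
--             if node in cycle:
--                 if nbr in cycle: pass   ############## node in,  nbr in  cycle ###########################################################
--                 else:    ############################# node in,  nbr out cycle ###########################################################
--                     if nbr in contracted_graph[loop_nodes]:
--                         contracted_graph[loop_nodes][nbr] = min(contracted_graph[loop_nodes][nbr], g[node][nbr])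
--                     else:
--                         contracted_graph[loop_nodes][nbr] = g[node][nbr]
--             else:
--                 if nbr in cycle: ##################### node out, nbr in  cycle ###########################################################
--                     if loop_nodes in contracted_graph[node]:
--                         contracted_graph[node][loop_nodes] = min(contracted_graph[node][loop_nodes], g[node][nbr])
--                     else:
--                         contracted_graph[node][loop_nodes] = g[node][nbr]
--                 else: ################################ node out, nbr out cycle ###########################################################
--                     contracted_graph[node][nbr] = g[node][nbr]
--     return contracted_graph, loop_nodes
-- ===== SOURCE B (Python) =====
-- def prune____graph(g, cycle):
--     # Staged group-by: index the contracted edges by source node once (tagging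
--     # edges that touch the cycle, since only contraction can create parallel
--     # edges that need min-merging), then build each output node's adjacency
--     # independently from its own bucket.
--     cyc = set(cycle)
--     loop_nodes = max(g.keys()) + "1"
--     rep = lambda x: loop_nodes if x in cyc else x
--     bysrc = {}
--     for node, nbrs in g.items():
--         nin = node in cyc
--         for nbr, w in nbrs.items():
--             vin = nbr in cyc
--             if not (nin and vin):
--                 bysrc.setdefault(rep(node), []).append((rep(nbr), w, nin or vin))
--     def build(u):
--         d = {}
--         for v, w, merge in bysrc.get(u, []):
--             d[v] = min(d[v], w) if (merge and v in d) else w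
--         return d
--     out = {loop_nodes: build(loop_nodes)}
--     for node in g:
--         if node not in cyc:
--             out[node] = build(node)
--     return out, loop_nodes
-- ===== Notes on version B (the rewrite author's own statement) =====
-- stated objective: faster
-- what changed: B is staged instead of A's single nested in-place pass: it first indexes the contracted edges by source node in one sweep (endpoints rewritten through rep, cycle-internal edges dropped, each edge tagged with whether an endpoint was contracted and hence needs min-merging, cycle membership tested against a set built once), then builds each output node's adjacency independently from its own bucket rather than mutating one shared nested dict edge by edge.
import Mathlib
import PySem

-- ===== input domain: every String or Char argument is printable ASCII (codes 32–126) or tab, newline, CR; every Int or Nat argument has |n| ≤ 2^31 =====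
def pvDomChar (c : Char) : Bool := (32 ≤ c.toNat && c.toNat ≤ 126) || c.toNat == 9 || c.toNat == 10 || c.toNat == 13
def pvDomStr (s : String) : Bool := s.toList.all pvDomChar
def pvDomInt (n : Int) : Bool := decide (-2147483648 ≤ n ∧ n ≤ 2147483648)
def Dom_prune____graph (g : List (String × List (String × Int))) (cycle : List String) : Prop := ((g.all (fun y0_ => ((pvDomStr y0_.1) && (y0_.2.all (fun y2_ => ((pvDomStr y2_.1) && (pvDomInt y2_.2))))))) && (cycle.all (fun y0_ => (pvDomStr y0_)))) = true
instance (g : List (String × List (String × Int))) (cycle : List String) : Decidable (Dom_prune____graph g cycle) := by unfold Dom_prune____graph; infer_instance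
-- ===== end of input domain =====

-- B replaces A's single nested in-place pass by a staged group-by: it indexes the
-- contracted edges by source node once (set-based cycle membership), then builds each
-- output node's adjacency from its own bucket; objective: faster (measured by the
-- timing run). A mutates nothing observable; equivalence is about the return value.


-- ===== PORT A =====
-- one iteration of A's inner 'for nbr in g[node]' body (the four commented branches);
-- 'nbr in contracted_graph[...]' is Dict.contains, 'min(...)'-or-assign is the two-way if
def pvAEdge (cycle : List String) (ln : String)
    (cg : PySem.Dict String (PySem.Dict String Int)) (node : String) (q : String × Int) :
    PySem.Dict String (PySem.Dict String Int) :=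
  if cycle.contains node then
    if cycle.contains q.1 then cg          -- node in, nbr in: pass
    else                                    -- node in, nbr out
      let d := cg.getD ln PySem.Dict.empty
      cg.insert ln (if d.contains q.1 then d.insert q.1 (min (d.getD q.1 0) q.2) else d.insert q.1 q.2)
  else
    if cycle.contains q.1 then              -- node out, nbr in
      let d := cg.getD node PySem.Dict.empty
      cg.insert node (if d.contains ln then d.insert ln (min (d.getD ln 0) q.2) else d.insert ln q.2)
    else                                     -- node out, nbr out
      cg.insert node ((cg.getD node PySem.Dict.empty).insert q.1 q.2)

def prune____graph (g : List (String × List (String × Int))) (cycle : List String) : (List (String × List (String × Int))) × String :=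
  match PySem.List.max? (g.map Prod.fst) (fun s => s) with   -- max(g.keys()); none = ValueError, excluded by Pre_
  | none => ([], "")
  | some m =>
    let ln := m ++ "1"                                        -- loop_nodes = max(g.keys()) + "1"
    let cg0 := (PySem.Dict.empty : PySem.Dict String (PySem.Dict String Int)).insert ln PySem.Dict.empty
    let cg1 := g.foldl (fun cg p => if !(cycle.contains p.1) then cg.insert p.1 PySem.Dict.empty else cg) cg0
    let cg2 := g.foldl (fun cg p => p.2.foldl (fun cg q => pvAEdge cycle ln cg p.1 q) cg) cg1
    (cg2.items.map (fun p => (p.1, p.2.items)), ln)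

-- ===== PORT B =====
-- rep(x) = loop_nodes if x in cyc else x
def pvRep (cyc : PySem.Set String) (ln x : String) : String :=
  if cyc.contains x then ln else x

-- the nested loop indexing the contracted, tagged edges by source node
-- ('bysrc.setdefault(rep(node), []).append(...)' is Dict.modify with default [];
-- the Bool tag records 'nin or vin')
def pvBySrc (cyc : PySem.Set String) (ln : String) (g : List (String × List (String × Int))) :
    PySem.Dict String (List (String × Int × Bool)) :=
  g.foldl (fun d p => p.2.foldl (fun d q =>
    if cyc.contains p.1 && cyc.contains q.1 then d
    else d.modify (pvRep cyc ln p.1) []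
      (fun l => l ++ [(pvRep cyc ln q.1, q.2, cyc.contains p.1 || cyc.contains q.1)])) d)
    PySem.Dict.empty

-- build(u): one output node's adjacency from its own bucket;
-- 'd[v] = min(d[v], w) if (merge and v in d) else w'
def pvBuild (bysrc : PySem.Dict String (List (String × Int × Bool))) (u : String) :
    PySem.Dict String Int :=
  (bysrc.getD u []).foldl (fun d t =>
    d.insert t.1 (if t.2.2 && d.contains t.1 then min (d.getD t.1 0) t.2.1 else t.2.1))
    PySem.Dict.empty

def prune____graph_alt (g : List (String × List (String × Int))) (cycle : List String) : (List (String × List (String × Int))) × String :=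
  let cyc := PySem.Set.ofList cycle
  match PySem.List.max? (g.map Prod.fst) (fun s => s) with
  | none => ([], "")
  | some m =>
    let ln := m ++ "1"
    let bysrc := pvBySrc cyc ln g
    let out0 := (PySem.Dict.empty : PySem.Dict String (PySem.Dict String Int)).insert ln (pvBuild bysrc ln)
    let out := g.foldl (fun o p => if !(cyc.contains p.1) then o.insert p.1 (pvBuild bysrc p.1) else o) out0
    (out.items.map (fun p => (p.1, p.2.items)), ln)

-- ===== PRECONDITION & SPEC =====
-- Pre_ excludes exactly the empty dict, on which A's max(g.keys()) raises ValueError.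
def Pre_prune____graph (g : List (String × List (String × Int))) (cycle : List String) : Prop := g ≠ []
instance (g : List (String × List (String × Int))) (cycle : List String) : Decidable (Pre_prune____graph g cycle) := by unfold Pre_prune____graph; infer_instance

def pvWitness_prune____graph : (List (String × List (String × Int))) × List String :=
  ([("a", [("b", 3), ("c", 1)]), ("b", [("a", 2)]), ("c", [])], ["b", "c"])

def Spec_prune____graph (g : List (String × List (String × Int))) (cycle : List String) (out : (List (String × List (String × Int))) × String) : Prop := out = prune____graph_alt g cycle
instance (g : List (String × List (String × Int))) (cycle : List String) (out : (List (String × List (String × Int))) × String) : Decidable (Spec_prune____graph g cycle out) := by unfold Spec_prune____graph; infer_instance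

-- ===== CLAIM =====
def Claim_equal_prune____graph : Prop := ∀ (g : List (String × List (String × Int))) (cycle : List String), Dom_prune____graph g cycle → Pre_prune____graph g cycle → Spec_prune____graph g cycle (prune____graph g cycle)

-- ===== LEMMAS AND PROOFS =====

-- proof-side rep over the raw cycle list
def pvRepL (cycle : List String) (ln x : String) : String :=
  if cycle.contains x then ln else x

-- proof-side view: the contracted tagged edge list in global iteration order
def pvEdges (cycle : List String) (ln : String) (g : List (String × List (String × Int))) :
    List (String × String × Int × Bool) :=
  g.flatMap (fun p => p.2.filterMap (fun q =>
    if cycle.contains p.1 && cycle.contains q.1 then none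
    else some (pvRepL cycle ln p.1, pvRepL cycle ln q.1, q.2,
               cycle.contains p.1 || cycle.contains q.1)))

-- proof-side view: gathering one node's edges from the global list
def pvGather (edges : List (String × String × Int × Bool)) (u : String) : PySem.Dict String Int :=
  edges.foldl (fun d t =>
    if t.1 == u then
      d.insert t.2.1 (if t.2.2.2 && d.contains t.2.1 then min (d.getD t.2.1 0) t.2.2.1 else t.2.2.1)
    else d) PySem.Dict.empty


-- apply one tagged edge to an inner dict (gather's body), and to the nested dict
def pvApply (d : PySem.Dict String Int) (t : String × String × Int × Bool) : PySem.Dict String Int :=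
  d.insert t.2.1 (if t.2.2.2 && d.contains t.2.1 then min (d.getD t.2.1 0) t.2.2.1 else t.2.2.1)

def pvStep (cg : PySem.Dict String (PySem.Dict String Int)) (t : String × String × Int × Bool) :
    PySem.Dict String (PySem.Dict String Int) :=
  cg.insert t.1 (pvApply (cg.getD t.1 PySem.Dict.empty) t)

-- the optional tagged edge produced by one inner iteration (pvEdges' inner function)
def pvH (cycle : List String) (ln node : String) (q : String × Int) :
    Option (String × String × Int × Bool) :=
  if cycle.contains node && cycle.contains q.1 then none
  else some (pvRepL cycle ln node, pvRepL cycle ln q.1, q.2,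
             cycle.contains node || cycle.contains q.1)

-- A's four branches are: drop, or pvStep on the rep-rewritten tagged triple
lemma pvAEdge_eq (cycle : List String) (ln : String) (cg : PySem.Dict String (PySem.Dict String Int))
    (node : String) (q : String × Int) :
    pvAEdge cycle ln cg node q = (pvH cycle ln node q).elim cg (pvStep cg) := by
  by_cases hn : node ∈ cycle <;> by_cases hv : q.1 ∈ cycle <;>
    simp [pvAEdge, pvH, pvStep, pvApply, pvRepL, hn, hv] <;>
    split_ifs <;> simp_all

lemma pv_foldl_opt {α β γ : Type} (l : List α) (h : α → Option β) (f : γ → β → γ) (c : γ) :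
    l.foldl (fun c x => (h x).elim c (f c)) c
      = (l.filterMap h).foldl f c := by
  induction l generalizing c with
  | nil => rfl
  | cons x l ih => cases hx : h x <;> simp [hx, ih]

lemma pv_foldl_flat (cycle : List String) (ln : String) (g : List (String × List (String × Int)))
    (c : PySem.Dict String (PySem.Dict String Int)) :
    g.foldl (fun c p => p.2.foldl (fun c q => pvAEdge cycle ln c p.1 q) c) c
      = (pvEdges cycle ln g).foldl pvStep c := by
  induction g generalizing c with
  | nil => rfl
  | cons p g ih =>
    have hinner : ∀ (c : PySem.Dict String (PySem.Dict String Int)),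
        p.2.foldl (fun c q => pvAEdge cycle ln c p.1 q) c
          = (p.2.filterMap (pvH cycle ln p.1)).foldl pvStep c := by
      intro c
      rw [← pv_foldl_opt]
      exact PySem.List.foldl_congr_mem _ _ _ _ (fun acc q _ => pvAEdge_eq cycle ln acc p.1 q)
    simp only [List.foldl_cons, ih, pvEdges, List.flatMap_cons, List.foldl_append, hinner]
    rfl

-- folding the edge updates over a dict whose keys cover all sources rewrites each entry independently
lemma pv_fold_items (E : List (String × String × Int × Bool))
    (c : PySem.Dict String (PySem.Dict String Int))
    (hnd : c.keys.Nodup) (hc : ∀ t ∈ E, c.contains t.1 = true) :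
    (E.foldl pvStep c).items
      = c.items.map (fun p => (p.1,
          E.foldl (fun d t => if t.1 == p.1 then pvApply d t else d) p.2)) := by
  induction E generalizing c with
  | nil => simp
  | cons t E ih =>
    have hct : c.contains t.1 = true := hc t (List.mem_cons_self ..)
    have hnd' : (pvStep c t).keys.Nodup := by
      simpa [pvStep] using PySem.Dict.nodup_keys_insert _ _ _ hnd
    have hc' : ∀ s ∈ E, (pvStep c t).contains s.1 = true := by
      intro s hs
      simp [pvStep, PySem.Dict.contains_insert, hc s (List.mem_cons_of_mem _ hs)]
    rw [List.foldl_cons, ih _ hnd' hc']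
    have hitems : (pvStep c t).items
        = c.items.map (fun p => if p.1 == t.1 then (t.1, pvApply (c.getD t.1 PySem.Dict.empty) t) else p) := by
      simpa [pvStep] using PySem.Dict.items_insert_of_contains c (pvApply (c.getD t.1 PySem.Dict.empty) t) hct
    rw [hitems, List.map_map]
    refine List.map_congr_left ?_
    intro p hp
    by_cases hpk : p.1 = t.1
    · have hget : c.getD t.1 PySem.Dict.empty = p.2 := by
        rw [← hpk]
        exact PySem.Dict.getD_of_mem_items c (show (p.1, p.2) ∈ c.items by simpa using hp) hnd _
      simp [Function.comp, hpk, hget]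
    · have h1 : (p.1 == t.1) = false := by simpa using hpk
      have h2 : ¬ t.1 = p.1 := fun h => hpk h.symm
      simp [Function.comp, h1, h2]

-- membership facts about A's initialisation fold (also B's output fold shape)
lemma pv_init_contains_mono (cycle : List String) (g : List (String × List (String × Int)))
    (c : PySem.Dict String (PySem.Dict String Int)) (k : String) (h : c.contains k = true) :
    (g.foldl (fun cg p => if !(cycle.contains p.1) then cg.insert p.1 PySem.Dict.empty else cg) c).contains k = true := by
  induction g generalizing c with
  | nil => exact h
  | cons p g ih =>
    simp only [List.foldl_cons]
    by_cases hb : cycle.contains p.1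
    · rw [hb]; exact ih c h
    · have hb' : cycle.contains p.1 = false := by simpa using hb
      rw [hb']
      exact ih _ (by simp [PySem.Dict.contains_insert, h])

lemma pv_init_contains_mem (cycle : List String) (g : List (String × List (String × Int)))
    (c : PySem.Dict String (PySem.Dict String Int)) (x : String)
    (hx : x ∈ g.map Prod.fst) (hcy : cycle.contains x = false) :
    (g.foldl (fun cg p => if !(cycle.contains p.1) then cg.insert p.1 PySem.Dict.empty else cg) c).contains x = true := by
  induction g generalizing c with
  | nil => simp at hx
  | cons p g ih =>
    simp only [List.map_cons, List.mem_cons] at hx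
    simp only [List.foldl_cons]
    rcases hx with hx | hx
    · subst hx
      rw [hcy]
      exact pv_init_contains_mono cycle g _ _ (by simp [PySem.Dict.contains_insert])
    · by_cases hb : cycle.contains p.1
      · rw [hb]; exact ih c hx
      · have hb' : cycle.contains p.1 = false := by simpa using hb
        rw [hb']; exact ih _ hx

lemma pv_init_nodup (cycle : List String) (g : List (String × List (String × Int)))
    (c : PySem.Dict String (PySem.Dict String Int)) (h : c.keys.Nodup) :
    (g.foldl (fun cg p => if !(cycle.contains p.1) then cg.insert p.1 PySem.Dict.empty else cg) c).keys.Nodup := by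
  induction g generalizing c with
  | nil => exact h
  | cons p g ih =>
    simp only [List.foldl_cons]
    by_cases hb : cycle.contains p.1
    · rw [hb]; exact ih c h
    · have hb' : cycle.contains p.1 = false := by simpa using hb
      rw [hb']; exact ih _ (PySem.Dict.nodup_keys_insert _ _ _ h)

lemma pv_init_values_empty (cycle : List String) (g : List (String × List (String × Int)))
    (c : PySem.Dict String (PySem.Dict String Int))
    (h : ∀ p ∈ c.items, p.2 = PySem.Dict.empty) :
    ∀ p ∈ (g.foldl (fun cg p => if !(cycle.contains p.1) then cg.insert p.1 PySem.Dict.empty else cg) c).items,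
      p.2 = PySem.Dict.empty := by
  induction g generalizing c with
  | nil => exact h
  | cons p g ih =>
    simp only [List.foldl_cons]
    by_cases hb : cycle.contains p.1
    · rw [hb]; exact ih c h
    · have hb' : cycle.contains p.1 = false := by simpa using hb
      rw [hb']
      refine ih _ ?_
      intro r hr
      rcases (PySem.Dict.mem_items_insert ..).mp hr with hr | hr
      · simp [hr]
      · exact h r hr.1

-- B's output fold runs in lockstep with A's initialisation fold, entrywise applying G
lemma pv_parallel (cycle : List String) (G : String → PySem.Dict String Int)
    (g : List (String × List (String × Int))) (c o : PySem.Dict String (PySem.Dict String Int))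
    (h : o.items = c.items.map (fun p => (p.1, G p.1))) :
    (g.foldl (fun o p => if !(cycle.contains p.1) then o.insert p.1 (G p.1) else o) o).items
      = (g.foldl (fun cg p => if !(cycle.contains p.1) then cg.insert p.1 PySem.Dict.empty else cg) c).items.map
          (fun p => (p.1, G p.1)) := by
  induction g generalizing c o with
  | nil => exact h
  | cons p g ih =>
    simp only [List.foldl_cons]
    by_cases hb : cycle.contains p.1
    · rw [hb]; exact ih c o h
    · have hb' : cycle.contains p.1 = false := by simpa using hb
      rw [hb']
      have hkeys : o.keys = c.keys := by
        show o.items.map Prod.fst = c.items.map Prod.fst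
        simp [h]
      have hcont : o.contains p.1 = c.contains p.1 := by
        rw [PySem.Dict.contains_eq_decide_mem_keys, PySem.Dict.contains_eq_decide_mem_keys, hkeys]
      have hstep : (o.insert p.1 (G p.1)).items
          = (c.insert p.1 PySem.Dict.empty).items.map (fun r => (r.1, G r.1)) := by
        by_cases hck : c.contains p.1
        · rw [PySem.Dict.items_insert_of_contains _ _ (hcont.trans hck),
              PySem.Dict.items_insert_of_contains _ _ hck,
              h, List.map_map, List.map_map]
          refine List.map_congr_left ?_
          intro r _
          by_cases hr : r.1 = p.1 <;> simp [Function.comp, hr]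
        · have hok : o.contains p.1 = false := by rw [hcont]; simpa using hck
          rw [PySem.Dict.items_insert_of_not_contains _ _ hok,
              PySem.Dict.items_insert_of_not_contains _ _ (by simpa using hck),
              h, List.map_append]
          rfl
      exact ih _ _ hstep

-- generic: folding over a flatMap is the nested fold
lemma pv_foldl_flatMap {α β γ : Type} (l : List α) (f : α → List β) (step : γ → β → γ) (c : γ) :
    (l.flatMap f).foldl step c = l.foldl (fun c a => (f a).foldl step c) c := by
  induction l generalizing c with
  | nil => rfl
  | cons a l ih => simp [List.foldl_append, ih]

-- 'x in set(cycle)' and 'x in cycle' agree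
lemma pvContains_ofList (cycle : List String) (x : String) :
    (PySem.Set.ofList cycle).contains x = cycle.contains x := by
  simp [PySem.Set.contains, PySem.Set.mem_ofList]

-- one inner iteration of pvBySrc is: drop, or modify-append on the tagged edge
lemma pvBEdge_eq (cycle : List String) (ln : String)
    (d : PySem.Dict String (List (String × Int × Bool))) (node : String) (q : String × Int) :
    (if (PySem.Set.ofList cycle).contains node && (PySem.Set.ofList cycle).contains q.1 then d
     else d.modify (pvRep (PySem.Set.ofList cycle) ln node) []
       (fun l => l ++ [(pvRep (PySem.Set.ofList cycle) ln q.1, q.2,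
                        (PySem.Set.ofList cycle).contains node || (PySem.Set.ofList cycle).contains q.1)]))
      = (pvH cycle ln node q).elim d (fun t => d.modify t.1 [] (fun l => l ++ [t.2])) := by
  by_cases hn : node ∈ cycle <;> by_cases hv : q.1 ∈ cycle <;>
    simp [pvH, pvRep, pvRepL, pvContains_ofList, hn, hv]

-- the by-source index is the modify-append fold over the global edge list
lemma pvBySrc_flat (cycle : List String) (ln : String) (g : List (String × List (String × Int))) :
    pvBySrc (PySem.Set.ofList cycle) ln g
      = (pvEdges cycle ln g).foldl (fun d t => d.modify t.1 [] (fun l => l ++ [t.2]))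
          PySem.Dict.empty := by
  unfold pvBySrc pvEdges
  rw [pv_foldl_flatMap]
  refine PySem.List.foldl_congr_mem _ _ _ _ ?_
  intro d p _
  rw [← pv_foldl_opt]
  exact PySem.List.foldl_congr_mem _ _ _ _ (fun d q _ => pvBEdge_eq cycle ln d p.1 q)

-- building from a bucket equals gathering from the global edge list
lemma pvBuild_eq (cycle : List String) (ln : String) (g : List (String × List (String × Int)))
    (u : String) :
    pvBuild (pvBySrc (PySem.Set.ofList cycle) ln g) u = pvGather (pvEdges cycle ln g) u := by
  unfold pvBuild pvGather
  rw [pvBySrc_flat, PySem.Dict.getD_foldl_modify_append, PySem.Dict.getD_empty,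
      List.nil_append, List.foldl_map, List.foldl_filter]

-- the main equation
theorem prune____graph_spec_aux (g : List (String × List (String × Int))) (cycle : List String) :
    prune____graph g cycle = prune____graph_alt g cycle := by
  unfold prune____graph prune____graph_alt
  cases hm : PySem.List.max? (g.map Prod.fst) (fun s => s) with
  | none => rfl
  | some m =>
    dsimp only
    set ln := m ++ "1" with hln
    set c0 := (PySem.Dict.empty : PySem.Dict String (PySem.Dict String Int)).insert ln PySem.Dict.empty with hc0
    set cg1 := g.foldl (fun cg p => if !(cycle.contains p.1) then cg.insert p.1 PySem.Dict.empty else cg) c0 with hcg1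
    set E := pvEdges cycle ln g with hE
    -- A's nested edge loop is the fold of pvStep over the contracted edge list
    have hflat : g.foldl (fun cg p => p.2.foldl (fun cg q => pvAEdge cycle ln cg p.1 q) cg) cg1
        = E.foldl pvStep cg1 := pv_foldl_flat cycle ln g cg1
    -- all edge sources are keys of cg1
    have hsrc : ∀ t ∈ E, cg1.contains t.1 = true := by
      intro t ht
      rw [hE] at ht
      simp only [pvEdges, List.mem_flatMap, List.mem_filterMap] at ht
      obtain ⟨p, hp, q, _, hq⟩ := ht
      by_cases hpc : cycle.contains p.1 = true
      · by_cases hqc : cycle.contains q.1 = true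
        · rw [hpc, hqc] at hq
          simp at hq
        · have hqc' : cycle.contains q.1 = false := by simpa using hqc
          rw [hpc, hqc', if_neg (by simp)] at hq
          have ht1 : t.1 = ln := by
            rw [← Option.some.inj hq]
            show pvRepL cycle ln p.1 = ln
            unfold pvRepL
            rw [hpc]
            exact if_pos rfl
          rw [ht1, hcg1]
          exact pv_init_contains_mono cycle g c0 ln (by simp [hc0, PySem.Dict.contains_insert])
      · have hpc' : cycle.contains p.1 = false := by simpa using hpc
        rw [hpc', if_neg (by simp)] at hq
        have ht1 : t.1 = p.1 := by
          rw [← Option.some.inj hq]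
          show pvRepL cycle ln p.1 = p.1
          unfold pvRepL
          rw [hpc']
          exact if_neg (by simp)
        rw [ht1, hcg1]
        exact pv_init_contains_mem cycle g c0 p.1 (List.mem_map_of_mem hp) hpc'
    have hnd : cg1.keys.Nodup := by
      rw [hcg1]
      exact pv_init_nodup cycle g c0
        (by simpa [hc0] using PySem.Dict.nodup_keys_insert _ _ _ PySem.Dict.nodup_keys_empty)
    have hvals : ∀ p ∈ cg1.items, p.2 = PySem.Dict.empty := by
      rw [hcg1]
      refine pv_init_values_empty cycle g c0 ?_
      intro p hp
      rcases (PySem.Dict.mem_items_insert ..).mp hp with hp | hp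
      · simp [hp]
      · exact absurd hp.1 (by simp [PySem.Dict.empty, PySem.Dict.items])
    -- A's result items, entry by entry
    have hA : (E.foldl pvStep cg1).items = cg1.items.map (fun p => (p.1, pvGather E p.1)) := by
      rw [pv_fold_items E cg1 hnd hsrc]
      refine List.map_congr_left ?_
      intro p hp
      rw [hvals p hp]
      rfl
    -- B's result items: lockstep with A's initialisation fold
    have hguard : (fun (o : PySem.Dict String (PySem.Dict String Int)) (p : String × List (String × Int)) =>
          if !((PySem.Set.ofList cycle).contains p.1) then o.insert p.1 (pvBuild (pvBySrc (PySem.Set.ofList cycle) ln g) p.1) else o)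
        = (fun o p => if !(cycle.contains p.1) then o.insert p.1 (pvBuild (pvBySrc (PySem.Set.ofList cycle) ln g) p.1) else o) := by
      funext o p
      rw [pvContains_ofList]
    have hB : (g.foldl (fun o p => if !((PySem.Set.ofList cycle).contains p.1) then o.insert p.1 (pvBuild (pvBySrc (PySem.Set.ofList cycle) ln g) p.1) else o)
          ((PySem.Dict.empty : PySem.Dict String (PySem.Dict String Int)).insert ln (pvBuild (pvBySrc (PySem.Set.ofList cycle) ln g) ln))).items
        = cg1.items.map (fun p => (p.1, pvBuild (pvBySrc (PySem.Set.ofList cycle) ln g) p.1)) := by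
      rw [hguard, hcg1]
      refine pv_parallel cycle (pvBuild (pvBySrc (PySem.Set.ofList cycle) ln g)) g c0 _ ?_
      rw [hc0, PySem.Dict.items_insert_of_not_contains _ _ (by rfl),
          PySem.Dict.items_insert_of_not_contains _ _ (by rfl)]
      rfl
    have hGB : (fun p : String × PySem.Dict String Int => (p.1, pvBuild (pvBySrc (PySem.Set.ofList cycle) ln g) p.1))
        = (fun p : String × PySem.Dict String Int => (p.1, pvGather E p.1)) := by
      funext p
      rw [pvBuild_eq, hE]
    rw [hflat]
    rw [hGB] at hB
    exact congrArg (fun l => (l.map (fun p => (p.1, p.2.items)), ln)) (hA.trans hB.symm)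

-- ===== VERDICT (by name: the statement is the Claim_ definition above) =====
theorem prune____graph_spec : Claim_equal_prune____graph := by
  intro g cycle _ _
  exact prune____graph_spec_aux g cycle
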